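-- pv_equiv track=rewrite | github.com/GengruiZhu/KmerGenoPhaser | lib/supervised/mapping_counts_to_blocks.py | rle_merge
-- ===== SOURCE A (Python) =====
-- def rle_merge(windows):
--     """Run-length encode adjacent windows with the same bloodline."""
--     if not windows:
--         return []
--     merged = []
--     cur_start, cur_end, cur_bl = windows[0]
--     for start, end, bl in windows[1:]:
--         if bl == cur_bl:
--             cur_end = end
--         else:
--             merged.append((cur_start, cur_end, cur_bl))
--             cur_start, cur_end, cur_bl = start, end, bl
--     merged.append((cur_start, cur_end, cur_bl))
--     return merged
-- ===== SOURCE B (Python) =====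
-- def rle_merge(windows):
--     """Run-length encode adjacent windows with the same bloodline, built back-to-front:
--     traverse in reverse and merge each window into the head run of the tail already built."""
--     out = []
--     for s, e, b in reversed(windows):
--         if out and out[-1][2] == b:
--             out[-1] = (s, out[-1][1], b)
--         else:
--             out.append((s, e, b))
--     out.reverse()
--     return out
-- ===== Notes on version B (the rewrite author's own statement) =====
-- stated objective: alternative
-- what changed: B builds the result back-to-front: it traverses the windows in reverse order and merges each window into the run most recently emitted (extending its start), then reverses once at the end, instead of A's forward pass carrying a cur_start/cur_end/cur_bl accumulator and flushing on change.
import Mathlib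
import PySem

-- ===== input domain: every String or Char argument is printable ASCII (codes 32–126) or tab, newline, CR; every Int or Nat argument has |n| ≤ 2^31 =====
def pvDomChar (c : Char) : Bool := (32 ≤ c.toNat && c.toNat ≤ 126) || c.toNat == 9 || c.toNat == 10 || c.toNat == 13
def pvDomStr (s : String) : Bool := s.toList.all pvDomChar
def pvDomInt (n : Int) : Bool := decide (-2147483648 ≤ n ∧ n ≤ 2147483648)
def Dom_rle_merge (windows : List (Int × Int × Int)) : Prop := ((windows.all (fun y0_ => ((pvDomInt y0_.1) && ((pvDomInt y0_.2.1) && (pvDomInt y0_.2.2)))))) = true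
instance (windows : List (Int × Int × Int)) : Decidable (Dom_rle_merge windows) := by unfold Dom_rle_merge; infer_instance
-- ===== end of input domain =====

-- B builds the result back-to-front (reverse traversal merging into the last emitted run,
-- one final reverse) instead of A's forward cur_start/cur_end/cur_bl accumulator; objective: alternative.

-- ===== PORT A =====
-- the `for start, end, bl in windows[1:]` loop, carrying (merged, cur_start, cur_end, cur_bl)
def rleLoopA : List (Int × Int × Int) → List (Int × Int × Int) → Int → Int → Int → List (Int × Int × Int)
  | [], merged, cs, ce, cb => merged ++ [(cs, ce, cb)]
  | (s, e, b) :: rest, merged, cs, ce, cb =>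
    if b == cb then rleLoopA rest merged cs e cb
    else rleLoopA rest (merged ++ [(cs, ce, cb)]) s e b

def rle_merge (windows : List (Int × Int × Int)) : List (Int × Int × Int) :=
  match windows with
  | [] => []
  | (cs, ce, cb) :: rest => rleLoopA rest [] cs ce cb

-- ===== PORT B =====
-- one step of B's loop body: merge window w into the end of `out`
-- (out[-1] = (s, out[-1][1], b) when bloodlines match, else out.append((s, e, b)))
def rleStepB (out : List (Int × Int × Int)) (w : Int × Int × Int) : List (Int × Int × Int) :=
  match out.getLast? with
  | some l => if l.2.2 == w.2.2 then out.dropLast ++ [(w.1, l.2.1, w.2.2)] else out ++ [w]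
  | none => [w]

-- B: fold the loop body over reversed(windows), then out.reverse()
def rle_merge_alt (windows : List (Int × Int × Int)) : List (Int × Int × Int) :=
  (windows.reverse.foldl rleStepB []).reverse

-- ===== PRECONDITION & SPEC =====
def Spec_rle_merge (windows : List (Int × Int × Int)) (out : List (Int × Int × Int)) : Prop := out = rle_merge_alt windows
instance (windows : List (Int × Int × Int)) (out : List (Int × Int × Int)) : Decidable (Spec_rle_merge windows out) := by unfold Spec_rle_merge; infer_instance

-- ===== CLAIM (what is proved, stated in full; the proofs are below) =====
def Claim_equal_rle_merge : Prop := ∀ (windows : List (Int × Int × Int)), Dom_rle_merge windows → Spec_rle_merge windows (rle_merge windows)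

-- ===== LEMMAS AND PROOFS =====

-- B's step, seen on the REVERSED output: prepend-or-merge-into-head
def pvConsMerge (w : Int × Int × Int) (out : List (Int × Int × Int)) : List (Int × Int × Int) :=
  match out with
  | [] => [w]
  | (_, e', b') :: tl => if b' == w.2.2 then (w.1, e', b') :: tl else w :: out

lemma stepB_rev (r : List (Int × Int × Int)) (w : Int × Int × Int) :
    (rleStepB r.reverse w).reverse = pvConsMerge w r := by
  cases r with
  | nil => simp [rleStepB, pvConsMerge]
  | cons h t =>
    obtain ⟨s', e', b'⟩ := h
    by_cases hb : b' == w.2.2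
    · have : b' = w.2.2 := by simpa using hb
      subst this
      simp [rleStepB, pvConsMerge, List.getLast?_reverse, hb]
    · simp [rleStepB, pvConsMerge, List.getLast?_reverse, hb]

lemma alt_eq_foldr (ws : List (Int × Int × Int)) :
    rle_merge_alt ws = List.foldr pvConsMerge [] ws := by
  unfold rle_merge_alt
  rw [List.foldl_reverse]
  induction ws with
  | nil => rfl
  | cons w t ih =>
    simp only [List.foldr_cons]
    have h := stepB_rev ((List.foldr (fun x y => rleStepB y x) [] t).reverse) w
    rw [List.reverse_reverse] at h
    rw [h, ih]

-- merging twice with the same bloodline collapses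
lemma consMerge_same (cs ce s e cb : Int) (R : List (Int × Int × Int)) :
    pvConsMerge (cs, ce, cb) (pvConsMerge (s, e, cb) R) = pvConsMerge (cs, e, cb) R := by
  cases R with
  | nil => simp [pvConsMerge]
  | cons h t =>
    obtain ⟨s', e', b'⟩ := h
    by_cases hb : b' == cb <;> simp [pvConsMerge, hb]

-- merging a different bloodline prepends
lemma consMerge_diff (cs ce cb s e b : Int) (hb : (b == cb) = false)
    (R : List (Int × Int × Int)) :
    pvConsMerge (cs, ce, cb) (pvConsMerge (s, e, b) R) =
      (cs, ce, cb) :: pvConsMerge (s, e, b) R := by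
  cases R with
  | nil => simp [pvConsMerge, hb]
  | cons h t =>
    obtain ⟨s', e', b'⟩ := h
    by_cases h2 : b' == b <;> simp_all [pvConsMerge]

-- A's loop only ever appends to `merged`: the accumulator factors out
lemma rleLoopA_acc (t : List (Int × Int × Int)) :
    ∀ (acc : List (Int × Int × Int)) (cs ce cb : Int),
      rleLoopA t acc cs ce cb = acc ++ rleLoopA t [] cs ce cb := by
  induction t with
  | nil => intro acc cs ce cb; simp [rleLoopA]
  | cons hd tl ih =>
    intro acc cs ce cb
    obtain ⟨s, e, b⟩ := hd
    by_cases h : b == cb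
    · simp only [rleLoopA, h, ite_true]
      exact ih acc cs e cb
    · simp only [rleLoopA, h, Bool.false_eq_true, ite_false]
      rw [ih (acc ++ [(cs, ce, cb)]), ih ([] ++ [(cs, ce, cb)])]
      simp

-- A's loop computes the back-to-front merge of the current run record into B's result on the rest
lemma rleLoopA_eq (t : List (Int × Int × Int)) :
    ∀ (cs ce cb : Int),
      rleLoopA t [] cs ce cb = pvConsMerge (cs, ce, cb) (List.foldr pvConsMerge [] t) := by
  induction t with
  | nil => intro cs ce cb; simp [rleLoopA, pvConsMerge]
  | cons hd tl ih =>
    intro cs ce cb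
    obtain ⟨s, e, b⟩ := hd
    by_cases h : b == cb
    · have hb : b = cb := by simpa using h
      subst hb
      simp only [rleLoopA, h, ite_true, List.foldr_cons]
      rw [ih cs e b, consMerge_same]
    · have h' : (b == cb) = false := by simpa using h
      simp only [rleLoopA, h', Bool.false_eq_true, ite_false, List.foldr_cons]
      rw [rleLoopA_acc, ih s e b, consMerge_diff _ _ _ _ _ _ h']
      simp

-- ===== VERDICT (by name: the statement is the Claim_ definition above) =====
theorem rle_merge_spec : Claim_equal_rle_merge := by
  intro windows _
  unfold Spec_rle_merge
  rw [alt_eq_foldr]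
  match windows with
  | [] => rfl
  | (cs, ce, cb) :: rest =>
    show rleLoopA rest [] cs ce cb = _
    rw [rleLoopA_eq, List.foldr_cons]
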